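-- pv_equiv track=rewrite | github.com/aguscurii05/IP-Algo-I | Parciales/SegundoParcial/Simulacro (2023)/SimulacroPython.py | contar_traducciones_iguales
-- ===== SOURCE A (Python) =====
-- def contar_traducciones_iguales(ing:dict[str,str],ale:dict[str,str])->int:
--     subkeys:list[str]=list(ale.keys())+list(ing.keys())
--     keys:list[str]=[]
--     for sub in subkeys:
--         if sub in list(ale.keys()) and sub in list(ing.keys()) and sub not in keys:
--             keys.append(sub)
--     res:int=0
--     for key in keys:
--         if ing[key]==ale[key]:
--             res+=1
--     return res
-- ===== SOURCE B (Python) =====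
-- def contar_traducciones_iguales(ing: dict[str, str], ale: dict[str, str]) -> int:
--     return len(ing.items() & ale.items())
-- ===== Notes on version B (the rewrite author's own statement) =====
-- stated objective: idiomatic
-- what changed: Replaces A's quadratic scan over concatenated key lists plus manual dedup and a second counting loop with the item-view set intersection len(ing.items() & ale.items()), which is exactly the set of shared (key, value) pairs.
import Mathlib
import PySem

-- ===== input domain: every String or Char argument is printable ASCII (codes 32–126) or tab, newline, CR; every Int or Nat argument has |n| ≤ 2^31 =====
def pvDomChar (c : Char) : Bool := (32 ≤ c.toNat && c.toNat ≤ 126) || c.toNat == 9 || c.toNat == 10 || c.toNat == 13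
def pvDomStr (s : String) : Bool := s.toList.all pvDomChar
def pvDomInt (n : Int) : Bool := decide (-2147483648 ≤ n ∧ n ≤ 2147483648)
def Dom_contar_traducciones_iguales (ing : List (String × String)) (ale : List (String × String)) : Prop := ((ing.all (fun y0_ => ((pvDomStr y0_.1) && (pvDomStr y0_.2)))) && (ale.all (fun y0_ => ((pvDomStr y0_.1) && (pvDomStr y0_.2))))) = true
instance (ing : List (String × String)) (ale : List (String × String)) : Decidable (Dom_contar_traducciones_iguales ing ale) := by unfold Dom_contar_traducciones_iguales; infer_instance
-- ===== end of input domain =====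

-- ===== PORT A =====
-- Header: B replaces A's quadratic key-list scan and dedup with the item-view set
-- intersection (idiomatic, asymptotically faster); return values proved equal everywhere.
def contar_traducciones_iguales (ing : List (String × String)) (ale : List (String × String)) : Int :=
  -- dicts arrive as insertion-ordered pair lists; build the Python dicts
  let dIng : PySem.Dict String String := PySem.Dict.ofList ing
  let dAle : PySem.Dict String String := PySem.Dict.ofList ale
  -- subkeys = list(ale.keys()) + list(ing.keys())
  let subkeys : List String := dAle.keys ++ dIng.keys
  -- for sub in subkeys: if sub in ale.keys() and sub in ing.keys() and sub not in keys: keys.append(sub)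
  let keys : List String := subkeys.foldl
    (fun ks sub =>
      if dAle.keys.contains sub && dIng.keys.contains sub && !(ks.contains sub)
      then ks ++ [sub] else ks) []
  -- for key in keys: if ing[key] == ale[key]: res += 1   (key is in both dicts, so lookup total)
  keys.foldl (fun res key => if dIng.getD key "" == dAle.getD key "" then res + 1 else res) 0

-- ===== PORT B =====
def contar_traducciones_iguales_alt (ing : List (String × String)) (ale : List (String × String)) : Int :=
  let dIng : PySem.Dict String String := PySem.Dict.ofList ing
  let dAle : PySem.Dict String String := PySem.Dict.ofList ale
  -- len(ing.items() & ale.items())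
  (PySem.Set.len (PySem.Set.inter (PySem.Set.ofList dIng.items) dAle.items) : Int)

-- ===== PRECONDITION & SPEC =====
def Spec_contar_traducciones_iguales (ing : List (String × String)) (ale : List (String × String)) (out : Int) : Prop := out = contar_traducciones_iguales_alt ing ale
instance (ing : List (String × String)) (ale : List (String × String)) (out : Int) : Decidable (Spec_contar_traducciones_iguales ing ale out) := by unfold Spec_contar_traducciones_iguales; infer_instance

-- ===== CLAIM (what is proved, stated in full; the proofs are below) =====
def Claim_equal_contar_traducciones_iguales : Prop := ∀ (ing : List (String × String)) (ale : List (String × String)), Dom_contar_traducciones_iguales ing ale → Spec_contar_traducciones_iguales ing ale (contar_traducciones_iguales ing ale)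

-- ===== LEMMAS AND PROOFS =====

-- A's dedup-append loop over l is Set.update of the filtered list (membership tests do not depend on the accumulator).
lemma foldl_dedup_filter (p : String → Bool) (l : List String) (acc : List String) :
    l.foldl (fun ks x => if p x && !(ks.contains x) then ks ++ [x] else ks) acc
      = PySem.Set.update acc (l.filter p) := by
  induction l generalizing acc with
  | nil => simp [PySem.Set.update]
  | cons x l ih =>
    by_cases hp : p x = true
    · have hstep : (if p x && !(acc.contains x) then acc ++ [x] else acc) = PySem.Set.add acc x := by
        rw [PySem.Set.add_eq_ite]
        by_cases hm : x ∈ acc <;> simp [hp, hm]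
      simp only [List.foldl_cons, hstep, List.filter_cons_of_pos hp, PySem.Set.update_cons]
      exact ih _
    · rw [List.foldl_cons, if_neg (by simp [hp]), List.filter_cons_of_neg (by simp [hp])]
      exact ih _

-- the main computation, with the dicts abstracted
lemma main_eq (dIng dAle : PySem.Dict String String)
    (hndI : dIng.keys.Nodup) (hndA : dAle.keys.Nodup) :
    (((dAle.keys ++ dIng.keys).foldl
        (fun ks sub =>
          if dAle.keys.contains sub && dIng.keys.contains sub && !(ks.contains sub)
          then ks ++ [sub] else ks) []).foldl
        (fun res key => if dIng.getD key "" == dAle.getD key "" then res + 1 else res) 0 : Int)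
      = (PySem.Set.len (PySem.Set.inter (PySem.Set.ofList dIng.items) dAle.items) : Int) := by
  set p : String → Bool := fun sub => dAle.keys.contains sub && dIng.keys.contains sub with hp
  -- A's keys list is dAle.keys.filter p
  have hkeys : ((dAle.keys ++ dIng.keys).foldl
        (fun ks sub => if p sub && !(ks.contains sub) then ks ++ [sub] else ks) [])
      = dAle.keys.filter p := by
    rw [foldl_dedup_filter, PySem.Set.update_nil_left, List.filter_append,
        PySem.Set.ofList_append, PySem.Set.ofList_eq_self_of_nodup _ (hndA.filter p),
        PySem.Set.update_eq_append_filter]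
    have : List.filter (fun y => !PySem.Set.contains (dAle.keys.filter p) y)
        (PySem.Set.ofList (dIng.keys.filter p)) = [] := by
      rw [List.filter_eq_nil_iff]
      intro a ha
      have ha' : a ∈ dIng.keys.filter p := (PySem.Set.mem_ofList _ _).mp ha
      have hpa : p a = true := (List.mem_filter.mp ha').2
      have haA : a ∈ dAle.keys := by
        have := (Bool.and_eq_true _ _).mp hpa
        exact List.contains_iff_mem.mp this.1
      simp [List.mem_filter.mpr ⟨haA, hpa⟩]
    rw [this, List.append_nil]
  rw [hkeys, PySem.List.foldl_count_if, zero_add]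
  -- B's side: filter over dIng's keys
  have hitemsI : dIng.items = dIng.keys.map (fun k => (k, dIng.getD k "")) :=
    PySem.Dict.items_eq_map_keys dIng hndI ""
  have hndItems : dIng.items.Nodup := by
    have : (dIng.items.map Prod.fst).Nodup := hndI
    exact this.of_map
  have hB : PySem.Set.inter (PySem.Set.ofList dIng.items) dAle.items
      = (dIng.keys.map (fun k => (k, dIng.getD k ""))).filter
          (fun pr => dAle.items.contains pr) := by
    rw [PySem.Set.ofList_eq_self_of_nodup _ hndItems, hitemsI]; rfl
  rw [PySem.Set.len, hB, List.filter_map, List.length_map]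
  -- both are lengths of filters of nodup lists with the same members
  rw [List.countP_filter, List.countP_eq_length_filter]
  congr 1
  apply List.Perm.length_eq
  rw [List.perm_ext_iff_of_nodup (hndA.filter _) (hndI.filter _)]
  intro k
  simp only [List.mem_filter, Function.comp]
  constructor
  · rintro ⟨hkA, hcond⟩
    have h1 := (Bool.and_eq_true _ _).mp hcond
    have hpk := (Bool.and_eq_true _ _).mp h1.2
    have hkI : k ∈ dIng.keys := List.contains_iff_mem.mp hpk.2
    have heq : dIng.getD k "" = dAle.getD k "" := by
      simpa using h1.1
    refine ⟨hkI, ?_⟩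
    have hmem : (k, dIng.getD k "") ∈ dAle.items := by
      rw [← PySem.Dict.get?_eq_some_iff_mem_items _ _ _ hndA]
      have hsome : dAle.get? k = some (dAle.getD k "") := by
        rcases h : dAle.get? k with _ | v
        · exact absurd ((PySem.Dict.get?_eq_none_iff_not_mem_keys _ _).mp h) (not_not_intro hkA)
        · rw [PySem.Dict.getD_of_get?_eq_some _ _ h]
      rw [hsome, heq]
    simpa using hmem
  · rintro ⟨hkI, hcont⟩
    have hmem : (k, dIng.getD k "") ∈ dAle.items := by simpa using hcont
    have hget : dAle.get? k = some (dIng.getD k "") :=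
      (PySem.Dict.get?_eq_some_iff_mem_items _ _ _ hndA).mpr hmem
    have hkA : k ∈ dAle.keys := by
      by_contra hk
      rw [(PySem.Dict.get?_eq_none_iff_not_mem_keys _ _).mpr hk] at hget
      cases hget
    have heq : dAle.getD k "" = dIng.getD k "" :=
      PySem.Dict.getD_of_get?_eq_some _ _ hget
    refine ⟨hkA, ?_⟩
    simp [hp, heq]
    exact ⟨hkA, hkI⟩

-- ===== VERDICT (by name: the statement is the Claim_ definition above) =====
theorem contar_traducciones_iguales_spec : Claim_equal_contar_traducciones_iguales := by
  intro ing ale _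
  unfold Spec_contar_traducciones_iguales contar_traducciones_iguales contar_traducciones_iguales_alt
  exact main_eq _ _ (PySem.Dict.nodup_keys_ofList _) (PySem.Dict.nodup_keys_ofList _)
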